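-- pv_equiv track=rewrite | github.com/lenkerpaulsv/cronwarden | cronwarden/scheduler.py | _next_values
-- ===== SOURCE A (Python) =====
-- def _next_values(field_str: str, lo: int, hi: int, current: int, reset: bool) -> tuple[int, bool]:
--     """Return the next valid value for a cron field and whether it wrapped."""
--     candidates = _expand_field(field_str, lo, hi)
--     if not reset:
--         forward = [v for v in candidates if v >= current]
--         if forward:
--             return forward[0], forward[0] != current
--         return candidates[0], True  # wrap
--     return candidates[0], False
--
-- def _expand_field(field_str: str, lo: int, hi: int) -> list[int]:
--     """Expand a single cron field string into a sorted list of integers."""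
--     values: set[int] = set()
--     for part in field_str.split(","):
--         if part == "*":
--             values.update(range(lo, hi + 1))
--         elif "/" in part:
--             base, step = part.split("/", 1)
--             step = int(step)
--             start = lo if base == "*" else int(base.split("-")[0])
--             end = hi if base == "*" else (int(base.split("-")[1]) if "-" in base else hi)
--             values.update(range(start, end + 1, step))
--         elif "-" in part:
--             a, b = part.split("-", 1)
--             values.update(range(int(a), int(b) + 1))
--         else:
--             values.add(int(part))
--     return sorted(values)
-- ===== SOURCE B (Python) =====
-- def _next_values(field_str: str, lo: int, hi: int, current: int, reset: bool):
--     """Single pass over the expanded values, tracking the overall minimum and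
--     the minimum value >= current; no set, no sort, no filtered list."""
--     lowest = None
--     ahead = None
--     for part in field_str.split(","):
--         for v in _part_values(part, lo, hi):
--             if lowest is None or v < lowest:
--                 lowest = v
--             if v >= current and (ahead is None or v < ahead):
--                 ahead = v
--     if reset:
--         return lowest, False
--     if ahead is not None:
--         return ahead, ahead != current
--     return lowest, True
--
-- def _part_values(part, lo, hi):
--     if part == "*":
--         return range(lo, hi + 1)
--     if "/" in part:
--         base, step_str = part.split("/", 1)
--         step = int(step_str)
--         if base == "*":
--             return range(lo, hi + 1, step)
--         pieces = base.split("-")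
--         start = int(pieces[0])
--         end = int(pieces[1]) if "-" in base else hi
--         return range(start, end + 1, step)
--     if "-" in part:
--         a, b = part.split("-", 1)
--         return range(int(a), int(b) + 1)
--     return (int(part),)
-- ===== Notes on version B (the rewrite author's own statement) =====
-- stated objective: alternative
-- what changed: B replaces A's build-a-set / sort / filter-into-a-forward-list pipeline by a single pass over the expanded values that tracks two running minima (the overall minimum and the minimum value >= current), so no set, no sort and no intermediate lists are built.
import Mathlib
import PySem

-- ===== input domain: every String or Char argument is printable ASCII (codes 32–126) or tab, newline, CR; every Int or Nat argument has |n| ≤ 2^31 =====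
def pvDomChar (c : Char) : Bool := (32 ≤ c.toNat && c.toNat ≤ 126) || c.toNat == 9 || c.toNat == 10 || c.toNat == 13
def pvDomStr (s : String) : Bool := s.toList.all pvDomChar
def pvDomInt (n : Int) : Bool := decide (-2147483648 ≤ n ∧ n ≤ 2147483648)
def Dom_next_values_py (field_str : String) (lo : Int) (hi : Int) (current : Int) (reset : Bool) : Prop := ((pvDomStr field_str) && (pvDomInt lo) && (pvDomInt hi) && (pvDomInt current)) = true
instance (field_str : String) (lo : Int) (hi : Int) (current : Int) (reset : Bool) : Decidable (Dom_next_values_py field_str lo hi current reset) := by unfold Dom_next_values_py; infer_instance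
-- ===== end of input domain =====

-- B replaces A's build-a-set / sort / filter-into-a-forward-list pipeline by a single pass over the
-- expanded values tracking two running minima (overall minimum and minimum value >= current).

-- ===== PORT A =====
-- 'values' is a Python set consumed only by sorted(); ported by hand as Std.HashSet (exact: a set's
-- contents do not depend on insertion order and sorted() reads them order-independently); 'values.update(r)'
-- is the element-wise insertion loop hsUpdate; 'sorted(values)' is Python's library sort (order-independent
-- of the set's iteration order on distinct keys), ported as List.mergeSort on the elements.
def hsUpdate (s : Std.HashSet Int) (xs : List Int) : Std.HashSet Int :=
  xs.foldl (fun s v => s.insert v) s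

-- one iteration of the 'for part in field_str.split(",")' loop of _expand_field;
-- 'none' = the Python raises there (ValueError from int(), or step == 0 in range()) — outside Pre_
def expandPartA (vals : Std.HashSet Int) (part : String) (lo hi : Int) : Option (Std.HashSet Int) :=
  if part = "*" then
    some (hsUpdate vals (PySem.List.pyRange lo (hi + 1) 1))
  else if PySem.Str.isIn "/" part then
    let sp := (PySem.Str.splitMax? part "/" 1).getD []
    let base := sp.getD 0 ""
    match PySem.Int.ofStr? (sp.getD 1 "") with
    | none => none
    | some step =>
      if step = 0 then none
      else
        let bsp := (PySem.Str.split? base "-").getD []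
        match (if base = "*" then some lo else PySem.Int.ofStr? (bsp.getD 0 "")) with
        | none => none
        | some start =>
          match (if base = "*" then some hi
                 else if PySem.Str.isIn "-" base then PySem.Int.ofStr? (bsp.getD 1 "") else some hi) with
          | none => none
          | some stop => some (hsUpdate vals (PySem.List.pyRange start (stop + 1) step))
  else if PySem.Str.isIn "-" part then
    let sp := (PySem.Str.splitMax? part "-" 1).getD []
    match PySem.Int.ofStr? (sp.getD 0 ""), PySem.Int.ofStr? (sp.getD 1 "") with
    | some a, some b => some (hsUpdate vals (PySem.List.pyRange a (b + 1) 1))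
    | _, _ => none
  else
    match PySem.Int.ofStr? part with
    | some v => some (vals.insert v)
    | none => none

def expand_fieldA (field_str : String) (lo hi : Int) : Option (List Int) :=
  (((PySem.Str.split? field_str ",").getD []).foldlM
      (fun vals part => expandPartA vals part lo hi) (∅ : Std.HashSet Int)).map
    (fun vals => vals.toList.mergeSort (fun a b => decide (a ≤ b)))

def next_values_py (field_str : String) (lo : Int) (hi : Int) (current : Int) (reset : Bool) : Int × Bool :=
  match expand_fieldA field_str lo hi with
  | none => (0, false)              -- Python raised in _expand_field (outside Pre_)
  | some candidates =>
    if !reset then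
      let forward := candidates.filter (fun v => decide (v ≥ current))
      match forward with
      | f :: _ => (f, decide (f ≠ current))
      | [] =>
        match candidates with
        | c :: _ => (c, true)
        | [] => (0, false)          -- IndexError (outside Pre_)
    else
      match candidates with
      | c :: _ => (c, false)
      | [] => (0, false)            -- IndexError (outside Pre_)

-- ===== PORT B =====
-- _part_values: the value list of one cron part; 'none' = Python raises (outside Pre_)
def partValuesB (part : String) (lo hi : Int) : Option (List Int) :=
  if part = "*" then some (PySem.List.pyRange lo (hi + 1) 1)
  else if PySem.Str.isIn "/" part then
    let sp := (PySem.Str.splitMax? part "/" 1).getD []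
    let base := sp.getD 0 ""
    match PySem.Int.ofStr? (sp.getD 1 "") with
    | none => none
    | some step =>
      if step = 0 then none
      else if base = "*" then some (PySem.List.pyRange lo (hi + 1) step)
      else
        let pieces := (PySem.Str.split? base "-").getD []
        match PySem.Int.ofStr? (pieces.getD 0 "") with
        | none => none
        | some start =>
          match (if PySem.Str.isIn "-" base then PySem.Int.ofStr? (pieces.getD 1 "") else some hi) with
          | none => none
          | some stop => some (PySem.List.pyRange start (stop + 1) step)
  else if PySem.Str.isIn "-" part then
    let sp := (PySem.Str.splitMax? part "-" 1).getD []
    match PySem.Int.ofStr? (sp.getD 0 ""), PySem.Int.ofStr? (sp.getD 1 "") with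
    | some a, some b => some (PySem.List.pyRange a (b + 1) 1)
    | _, _ => none
  else (PySem.Int.ofStr? part).map (fun v => [v])

-- the body of B's inner loop: update (lowest, ahead) with one value v
def trackB (current : Int) (st : Option Int × Option Int) (v : Int) : Option Int × Option Int :=
  let lowest := match st.1 with
    | none => some v
    | some m => if v < m then some v else some m
  let ahead := if current ≤ v then
      match st.2 with
      | none => some v
      | some a => if v < a then some v else some a
    else st.2
  (lowest, ahead)

def next_values_py_alt (field_str : String) (lo : Int) (hi : Int) (current : Int) (reset : Bool) : Int × Bool :=
  match ((PySem.Str.split? field_str ",").getD []).foldlM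
      (fun st part => (partValuesB part lo hi).map (fun vs => vs.foldl (trackB current) st))
      (((none, none) : Option Int × Option Int)) with
  | none => (0, false)              -- Python raised in _part_values (outside Pre_)
  | some (lowest, ahead) =>
    if reset then (lowest.getD 0, false)
    else
      match ahead with
      | some a => (a, decide (a ≠ current))
      | none => (lowest.getD 0, true)

-- ===== PRECONDITION & SPEC =====
-- syntactic validity of one cron part: the grammar A's int()/range() calls accept (step ≠ 0)
def partOk (part : String) (lo hi : Int) : Bool :=
  if part = "*" then true
  else if PySem.Str.isIn "/" part then
    let sp := (PySem.Str.splitMax? part "/" 1).getD []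
    let base := sp.getD 0 ""
    match PySem.Int.ofStr? (sp.getD 1 "") with
    | none => false
    | some step =>
      decide (step ≠ 0) &&
      (decide (base = "*") ||
        (let pieces := (PySem.Str.split? base "-").getD []
         (PySem.Int.ofStr? (pieces.getD 0 "")).isSome &&
         (!PySem.Str.isIn "-" base || (PySem.Int.ofStr? (pieces.getD 1 "")).isSome)))
  else if PySem.Str.isIn "-" part then
    let sp := (PySem.Str.splitMax? part "-" 1).getD []
    (PySem.Int.ofStr? (sp.getD 0 "")).isSome && (PySem.Int.ofStr? (sp.getD 1 "")).isSome
  else (PySem.Int.ofStr? part).isSome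

-- does this (valid) part contribute at least one value?
def partHasValue (part : String) (lo hi : Int) : Bool :=
  if part = "*" then decide (lo ≤ hi)
  else if PySem.Str.isIn "/" part then
    let sp := (PySem.Str.splitMax? part "/" 1).getD []
    let base := sp.getD 0 ""
    let step := (PySem.Int.ofStr? (sp.getD 1 "")).getD 1
    let pieces := (PySem.Str.split? base "-").getD []
    let start := if base = "*" then lo else (PySem.Int.ofStr? (pieces.getD 0 "")).getD 0
    let stop := if base = "*" then hi
                else if PySem.Str.isIn "-" base then (PySem.Int.ofStr? (pieces.getD 1 "")).getD 0
                else hi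
    !(PySem.List.pyRange start (stop + 1) step).isEmpty
  else if PySem.Str.isIn "-" part then
    let sp := (PySem.Str.splitMax? part "-" 1).getD []
    decide ((PySem.Int.ofStr? (sp.getD 0 "")).getD 0 ≤ (PySem.Int.ofStr? (sp.getD 1 "")).getD 0)
  else true

-- Pre_ = exactly the inputs on which the Python A returns normally: every comma-part is
-- syntactically valid with a non-zero step (otherwise int()/range() raises ValueError) and at
-- least one part contributes a value (otherwise candidates[0] raises IndexError).
def Pre_next_values_py (field_str : String) (lo : Int) (hi : Int) (current : Int) (reset : Bool) : Prop :=
  (((PySem.Str.split? field_str ",").getD []).all (fun p => partOk p lo hi) &&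
   ((PySem.Str.split? field_str ",").getD []).any (fun p => partHasValue p lo hi)) = true
instance (field_str : String) (lo : Int) (hi : Int) (current : Int) (reset : Bool) : Decidable (Pre_next_values_py field_str lo hi current reset) := by unfold Pre_next_values_py; infer_instance
def pvWitness_next_values_py : String × Int × Int × Int × Bool := ("1-5,*/2", 0, 10, 3, false)

def Spec_next_values_py (field_str : String) (lo : Int) (hi : Int) (current : Int) (reset : Bool) (out : Int × Bool) : Prop := out = next_values_py_alt field_str lo hi current reset
instance (field_str : String) (lo : Int) (hi : Int) (current : Int) (reset : Bool) (out : Int × Bool) : Decidable (Spec_next_values_py field_str lo hi current reset out) := by unfold Spec_next_values_py; infer_instance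

-- ===== CLAIM (what is proved, stated in full; the proofs are below) =====
def Claim_equal_next_values_py : Prop := ∀ (field_str : String) (lo : Int) (hi : Int) (current : Int) (reset : Bool), Dom_next_values_py field_str lo hi current reset → Pre_next_values_py field_str lo hi current reset → Spec_next_values_py field_str lo hi current reset (next_values_py field_str lo hi current reset)

-- ===== LEMMAS AND PROOFS =====

-- the value list of one valid part (proof-side name for what both ports expand a part to)
def vlist (part : String) (lo hi : Int) : List Int := (partValuesB part lo hi).getD []
-- the two components of B's loop body
def lowF (o : Option Int) (v : Int) : Option Int :=
  match o with | none => some v | some m => if v < m then some v else some m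
def ahFn (current : Int) (o : Option Int) (v : Int) : Option Int :=
  if current ≤ v then lowF o v else o
theorem trackB_eq (c : Int) : trackB c = fun st v => (lowF st.1 v, ahFn c st.2 v) := rfl

theorem part_lemma (part : String) (lo hi : Int) (h : partOk part lo hi = true) :
    partValuesB part lo hi = some (vlist part lo hi) ∧
    (∀ vals, expandPartA vals part lo hi = some (hsUpdate vals (vlist part lo hi))) ∧
    (partHasValue part lo hi = true → vlist part lo hi ≠ []) := by
  unfold partOk at h
  unfold partValuesB expandPartA partHasValue vlist partValuesB
  by_cases hstar : part = "*"
  · subst hstar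
    simp only [if_true, Option.getD_some, decide_eq_true_eq]
    refine ⟨by simp, fun _ => by simp, fun hv => ?_⟩
    intro hnil
    have hmem : lo ∈ PySem.List.pyRange lo (hi + 1) 1 := by
      rw [PySem.List.mem_pyRange_one]; omega
    rw [hnil] at hmem
    simp at hmem
  · simp only [if_neg hstar] at h ⊢
    by_cases hslash : PySem.Str.isIn "/" part = true
    · simp only [if_pos hslash] at h ⊢
      rcases hstep : PySem.Int.ofStr? (((PySem.Str.splitMax? part "/" 1).getD []).getD 1 "") with _ | step
      · simp only [hstep] at h; exact absurd h (by simp)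
      · simp only [hstep, Option.getD_some] at h ⊢
        simp only [Bool.and_eq_true, Bool.or_eq_true, decide_eq_true_eq] at h
        obtain ⟨hs0, hbase⟩ := h
        simp only [if_neg hs0]
        by_cases hb : ((PySem.Str.splitMax? part "/" 1).getD []).getD 0 "" = "*"
        · simp only [if_pos hb, Option.getD_some]
          refine ⟨by simp, fun _ => by simp, fun hv => ?_⟩
          simpa using hv
        · simp only [if_neg hb]
          rcases hbase with hb' | hbase
          · exact absurd hb' hb
          · simp only [Bool.not_eq_eq_eq_not, Bool.not_true,
              Option.isSome_iff_exists] at hbase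
            obtain ⟨⟨start, hstart⟩, hrest⟩ := hbase
            simp only [hstart, Option.getD_some]
            by_cases hdash : PySem.Str.isIn "-" (((PySem.Str.splitMax? part "/" 1).getD []).getD 0 "") = true
            · rcases hrest with hfalse | ⟨stop, hstop⟩
              · rw [hdash] at hfalse; exact absurd hfalse (by simp)
              · simp only [if_pos hdash, hstop, Option.getD_some]
                refine ⟨by simp, fun _ => by simp, fun hv => ?_⟩
                simpa using hv
            · simp only [if_neg hdash, Option.getD_some]
              refine ⟨by simp, fun _ => by simp, fun hv => ?_⟩
              simpa using hv
    · simp only [if_neg hslash] at h ⊢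
      by_cases hdash : PySem.Str.isIn "-" part = true
      · simp only [if_pos hdash] at h ⊢
        simp only [Bool.and_eq_true, Option.isSome_iff_exists] at h
        obtain ⟨⟨a, ha⟩, ⟨b, hb⟩⟩ := h
        simp only [ha, hb, Option.getD_some]
        refine ⟨by simp, fun _ => by simp, fun hv => ?_⟩
        simp only [decide_eq_true_eq] at hv
        intro hnil
        have hmem : a ∈ PySem.List.pyRange a (b + 1) 1 := by
          rw [PySem.List.mem_pyRange_one]; omega
        rw [hnil] at hmem
        simp at hmem
      · simp only [if_neg hdash] at h ⊢
        simp only [Option.isSome_iff_exists] at h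
        obtain ⟨v, hv⟩ := h
        simp only [hv, Option.map_some, Option.getD_some]
        refine ⟨by simp, fun vals => ?_, fun _ => by simp⟩
        simp [hsUpdate]
theorem mem_hsUpdate (s : Std.HashSet Int) (xs : List Int) (x : Int) :
    x ∈ hsUpdate s xs ↔ x ∈ s ∨ x ∈ xs := by
  induction xs generalizing s with
  | nil => simp [hsUpdate]
  | cons y t ih =>
    rw [hsUpdate, List.foldl_cons, ← hsUpdate, ih]
    simp [Std.HashSet.mem_insert]
    tauto

-- Python's sorted() on the distinct elements of a set: strictly increasing, same membership
theorem sort_facts (s : Std.HashSet Int) :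
    (s.toList.mergeSort (fun a b => decide (a ≤ b))).Pairwise (· < ·) ∧
    (∀ x, x ∈ s.toList.mergeSort (fun a b => decide (a ≤ b)) ↔ x ∈ s) := by
  have hperm := List.mergeSort_perm s.toList (fun a b => decide (a ≤ b))
  have hnd : (s.toList.mergeSort (fun a b => decide (a ≤ b))).Nodup := by
    rw [hperm.nodup_iff]
    have := Std.HashSet.distinct_toList (m := s)
    exact this.imp (fun h => by simpa using h)
  have hsorted := List.pairwise_mergeSort
    (le := fun a b : Int => decide (a ≤ b))
    (fun a b c => by simpa using le_trans) (fun a b => by simpa using le_total a b) s.toList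
  constructor
  · have := hsorted.and hnd
    exact this.imp (fun ⟨h1, h2⟩ => lt_of_le_of_ne (by simpa using h1) h2)
  · intro x
    rw [hperm.mem_iff, Std.HashSet.mem_toList]

theorem foldA (parts : List String) (lo hi : Int)
    (h : ∀ p ∈ parts, partOk p lo hi = true) (vals : Std.HashSet Int) :
    parts.foldlM (fun vals part => expandPartA vals part lo hi) vals
      = some (hsUpdate vals (parts.flatMap (fun p => vlist p lo hi))) := by
  induction parts generalizing vals with
  | nil => simp [hsUpdate]
  | cons p t ih =>
    have hp := (part_lemma p lo hi (h p (by simp))).2.1 vals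
    rw [List.foldlM_cons, hp]
    show (List.foldlM _ (hsUpdate vals (vlist p lo hi)) t : Option _) = _
    rw [ih (fun q hq => h q (by simp [hq]))]
    simp [hsUpdate, List.foldl_append]

theorem foldB (parts : List String) (lo hi current : Int)
    (h : ∀ p ∈ parts, partOk p lo hi = true) (st : Option Int × Option Int) :
    parts.foldlM (fun st part => (partValuesB part lo hi).map (fun vs => vs.foldl (trackB current) st)) st
      = some ((parts.flatMap (fun p => vlist p lo hi)).foldl (trackB current) st) := by
  induction parts generalizing st with
  | nil => simp
  | cons p t ih =>
    have hp := (part_lemma p lo hi (h p (by simp))).1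
    rw [List.foldlM_cons, hp]
    show (List.foldlM _ ((vlist p lo hi).foldl (trackB current) st) t : Option _) = _
    rw [ih (fun q hq => h q (by simp [hq]))]
    simp [List.foldl_append]

theorem foldl_lowF_some (L : List Int) (a : Int) :
    L.foldl lowF (some a) = some (L.foldl min a) := by
  induction L generalizing a with
  | nil => rfl
  | cons x t ih =>
    rw [List.foldl_cons, List.foldl_cons]
    have h : lowF (some a) x = some (min a x) := by
      simp only [lowF]; split_ifs with h <;> (congr 1; omega)
    rw [h, ih]

theorem head_eq_foldl_lowF (c L : List Int)
    (hp : c.Pairwise (· < ·)) (hm : ∀ x, x ∈ c ↔ x ∈ L) :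
    c.head? = L.foldl lowF none := by
  cases L with
  | nil =>
    cases c with
    | nil => rfl
    | cons h t => exact absurd ((hm h).1 (by simp)) (by simp)
  | cons x t =>
    rw [List.foldl_cons]
    show c.head? = t.foldl lowF (some x)
    rw [foldl_lowF_some]
    have hmem : t.foldl min x ∈ x :: t := by
      rcases PySem.List.foldl_min_mem t x with h | h
      · rw [h]; simp
      · simp [h]
    have hle : ∀ y ∈ x :: t, t.foldl min x ≤ y := by
      intro y hy
      rcases List.mem_cons.1 hy with rfl | hy
      · exact (PySem.List.foldl_min_le t y).1
      · exact (PySem.List.foldl_min_le t x).2 y hy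
    cases c with
    | nil => exact absurd ((hm _).2 hmem) (by simp)
    | cons h tc =>
      have hhm : h ≤ t.foldl min x := by
        rcases List.mem_cons.1 ((hm _).2 hmem) with heq | htc
        · omega
        · have := (List.pairwise_cons.1 hp).1 _ htc
          omega
      have hmh : t.foldl min x ≤ h := hle h ((hm h).1 (by simp))
      simp only [List.head?_cons]
      congr 1
      omega
theorem next_values_py_spec_aux (field_str : String) (lo hi current : Int) (reset : Bool)
    (hpre : Pre_next_values_py field_str lo hi current reset) :
    next_values_py field_str lo hi current reset = next_values_py_alt field_str lo hi current reset := by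
  unfold Pre_next_values_py at hpre
  simp only [Bool.and_eq_true, List.all_eq_true, List.any_eq_true] at hpre
  obtain ⟨hok, p0, hp0mem, hp0val⟩ := hpre
  set parts := (PySem.Str.split? field_str ",").getD [] with hparts
  set L := parts.flatMap (fun p => vlist p lo hi) with hL
  have hLne : L ≠ [] := by
    have hv := (part_lemma p0 lo hi (hok p0 hp0mem)).2.2 hp0val
    rcases hx : vlist p0 lo hi with _ | ⟨x, xs⟩
    · exact absurd hx hv
    · intro hnil
      have hmem : x ∈ L := by
        rw [hL]; exact List.mem_flatMap.2 ⟨p0, hp0mem, by rw [hx]; simp⟩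
      rw [hnil] at hmem
      simp at hmem
  have hA : expand_fieldA field_str lo hi
      = some ((hsUpdate (∅ : Std.HashSet Int) L).toList.mergeSort (fun a b => decide (a ≤ b))) := by
    unfold expand_fieldA
    rw [← hparts, foldA parts lo hi hok (∅ : Std.HashSet Int)]
    rfl
  set c := (hsUpdate (∅ : Std.HashSet Int) L).toList.mergeSort (fun a b => decide (a ≤ b)) with hc
  have hcp : c.Pairwise (· < ·) := (sort_facts _).1
  have hcm : ∀ x, x ∈ c ↔ x ∈ L := by
    intro x
    rw [hc, (sort_facts _).2 x, mem_hsUpdate]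
    simp
  have hB : ((PySem.Str.split? field_str ",").getD []).foldlM
      (fun st part => (partValuesB part lo hi).map (fun vs => vs.foldl (trackB current) st))
      (((none, none) : Option Int × Option Int))
      = some (L.foldl lowF none, L.foldl (ahFn current) none) := by
    rw [← hparts, foldB parts lo hi current hok, trackB_eq]
    rw [PySem.List.foldl_prod_mk lowF (ahFn current) L none none]
  have hhead : c.head? = L.foldl lowF none := head_eq_foldl_lowF c L hcp hcm
  have hfilt : (c.filter (fun v => decide (v ≥ current))).head? = L.foldl (ahFn current) none := by
    have heq : L.foldl (ahFn current) none
        = (L.filter (fun v => decide (current ≤ v))).foldl lowF none :=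
      PySem.List.foldl_ite_eq_foldl_filter (fun v => current ≤ v) lowF L none
    rw [heq]
    apply head_eq_foldl_lowF
    · exact hcp.filter _
    · intro x
      simp only [List.mem_filter, hcm x, ge_iff_le, decide_eq_true_eq]
  have hcne : c ≠ [] := by
    rcases hLx : L with _ | ⟨x, xs⟩
    · exact absurd hLx hLne
    · intro hnil
      have hmem : x ∈ c := (hcm x).2 (by rw [hLx]; simp)
      rw [hnil] at hmem
      simp at hmem
  unfold next_values_py next_values_py_alt
  rw [hA, hB]
  rcases hcx : c with _ | ⟨c0, ct⟩
  · exact absurd hcx hcne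
  · have hlow : L.foldl lowF none = some c0 := by rw [← hhead, hcx]; rfl
    cases reset with
    | true => simp [hlow]
    | false =>
      rw [hcx] at hfilt
      rcases hfx : (c0 :: ct).filter (fun v => decide (v ≥ current)) with _ | ⟨f0, ft⟩
      · have hah : L.foldl (ahFn current) none = none := by rw [← hfilt, hfx]; rfl
        simp [hah, hlow, hfx]
      · have hah : L.foldl (ahFn current) none = some f0 := by rw [← hfilt, hfx]; rfl
        simp [hah, hfx]

theorem next_values_py_spec : Claim_equal_next_values_py := by
  intro field_str lo hi current reset _ hpre
  unfold Spec_next_values_py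
  exact next_values_py_spec_aux field_str lo hi current reset hpre
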